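-- pv_equiv track=rewrite | github.com/akakss225/Python_tutorial | answer.py | solution
-- ===== SOURCE A (Python) =====
-- def solution(arr):
--     answer = []
--     nums = [0, 0, 0]
--     for i in arr:
--         if i == 1:
--             nums[0] += 1
--         elif i == 2:
--             nums[1] += 1
--         else:
--             nums[2] += 1
--
--     for i in range(len(nums)):
--         num = max(nums) - nums[i]
--         answer.append(num)
--
--     return answer
-- ===== SOURCE B (Python) =====
-- def _prefix_below(s, x):
--     # length of the prefix of sorted list s whose elements are < x
--     k = 0
--     while k < len(s) and s[k] < x:
--         k += 1
--     return k
--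
--
-- def solution(arr):
--     s = sorted(arr)
--     b1 = _prefix_below(s, 1)
--     b2 = _prefix_below(s, 2)
--     b3 = _prefix_below(s, 3)
--     c1 = b2 - b1
--     c2 = b3 - b2
--     c3 = len(s) - c1 - c2
--     m = max(c1, c2, c3)
--     return [m - c1, m - c2, m - c3]
-- ===== Notes on version B (the rewrite author's own statement) =====
-- stated objective: alternative
-- what changed: Replaces A's single-pass three-bucket tally loop with a sort followed by three prefix-boundary scans on the sorted list: bucket sizes are recovered as differences of 'first index whose element is not below x' for x = 1, 2, 3 (correct because counting non-1/non-2 values as the third bucket makes it len - c1 - c2); trades the O(n) counting pass for O(n log n) sorting.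
import Mathlib
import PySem

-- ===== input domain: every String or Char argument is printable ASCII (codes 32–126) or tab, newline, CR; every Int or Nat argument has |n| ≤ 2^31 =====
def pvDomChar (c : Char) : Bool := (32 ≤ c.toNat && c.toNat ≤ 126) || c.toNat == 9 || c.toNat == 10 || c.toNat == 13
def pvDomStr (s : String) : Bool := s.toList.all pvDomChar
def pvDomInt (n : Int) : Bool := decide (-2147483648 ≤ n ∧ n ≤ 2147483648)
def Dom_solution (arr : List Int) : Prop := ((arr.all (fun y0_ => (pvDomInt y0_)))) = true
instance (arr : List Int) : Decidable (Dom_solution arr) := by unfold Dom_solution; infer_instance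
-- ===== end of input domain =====

-- B replaces A's bucket-tally loop with a sort followed by three prefix-boundary scans
-- (bucket sizes read off as differences of 'first index not below x'); alternative algorithm, not faster.

-- ===== PORT A =====
-- one step of A's tally loop: nums[0]+=1 / nums[1]+=1 / nums[2]+=1
def tallyStep (n : Int × Int × Int) (i : Int) : Int × Int × Int :=
  if i == 1 then (n.1 + 1, n.2.1, n.2.2)
  else if i == 2 then (n.1, n.2.1 + 1, n.2.2)
  else (n.1, n.2.1, n.2.2 + 1)

def solution (arr : List Int) : List Int :=
  -- nums = [0,0,0]; for i in arr: bucket tally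
  let nums := arr.foldl tallyStep (0, 0, 0)
  let numsL : List Int := [nums.1, nums.2.1, nums.2.2]
  let mx := max nums.1 (max nums.2.1 nums.2.2)  -- max(nums) on the 3-element list
  (PySem.List.pyRange 0 (numsL.length : Int) 1).foldl
    (fun answer i => answer ++ [mx - PySem.List.pyGetD numsL i 0]) []

-- ===== PORT B =====
-- the while loop of _prefix_below: k += 1 while k < len(s) and s[k] < x
-- (s[k] ported as pyGetD s k 0: the guard only reads it with k in range)
def prefixBelowGo (s : List Int) (x : Int) (k : Int) : Int :=
  if h : k < (s.length : Int) ∧ PySem.List.pyGetD s k 0 < x then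
    prefixBelowGo s x (k + 1)
  else k
termination_by ((s.length : Int) - k).toNat
decreasing_by omega

def prefixBelow (s : List Int) (x : Int) : Int := prefixBelowGo s x 0

def solution_alt (arr : List Int) : List Int :=
  let s := PySem.List.sorted arr (fun y => y) false
  let b1 := prefixBelow s 1
  let b2 := prefixBelow s 2
  let b3 := prefixBelow s 3
  let c1 := b2 - b1
  let c2 := b3 - b2
  let c3 := (s.length : Int) - c1 - c2
  let m := max c1 (max c2 c3)
  [m - c1, m - c2, m - c3]

-- ===== PRECONDITION & SPEC =====
def Spec_solution (arr : List Int) (out : List Int) : Prop := out = solution_alt arr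
instance (arr : List Int) (out : List Int) : Decidable (Spec_solution arr out) := by unfold Spec_solution; infer_instance

-- ===== CLAIM (what is proved, stated in full; the proofs are below) =====
def Claim_equal_solution : Prop := ∀ (arr : List Int), Dom_solution arr → Spec_solution arr (solution arr)

-- ===== LEMMAS AND PROOFS =====

-- A's tally fold computes (a + #1s, b + #2s, c + #others), for any start accumulator.
theorem tally_fold (arr : List Int) (a b c : Int) :
    arr.foldl tallyStep (a, b, c)
    = (a + (arr.count 1 : Int), b + (arr.count 2 : Int),
       c + ((arr.length : Int) - (arr.count 1 : Int) - (arr.count 2 : Int))) := by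
  induction arr generalizing a b c with
  | nil => simp
  | cons x xs ih =>
    rw [List.foldl_cons]
    by_cases h1 : x = 1
    · subst h1
      rw [show tallyStep (a, b, c) 1 = (a + 1, b, c) by rfl, ih]
      simp [Prod.ext_iff]
      omega
    · by_cases h2 : x = 2
      · subst h2
        rw [show tallyStep (a, b, c) 2 = (a, b + 1, c) by rfl, ih]
        simp [Prod.ext_iff]
        omega
      · rw [show tallyStep (a, b, c) x = (a, b, c + 1) by simp [tallyStep, h1, h2], ih]
        simp [Prod.ext_iff, h1, h2]
        omega

-- On the sorted list, the while loop started at position k stops after the elements < x beyond k.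
theorem prefixBelowGo_sorted (arr : List Int) (x : Int) :
    ∀ (n k : Nat), (PySem.List.sorted arr (fun y => y) false).length - k = n →
      prefixBelowGo (PySem.List.sorted arr (fun y => y) false) x (k : Int)
        = (k : Int) + (((PySem.List.sorted arr (fun y => y) false).drop k).countP
            (fun a => decide (a < x)) : Int) := by
  intro n
  induction n with
  | zero =>
    intro k hk
    rw [prefixBelowGo]
    have hlen : (PySem.List.sorted arr (fun y => y) false).length ≤ k := by omega
    rw [dif_neg (by omega)]
    rw [List.drop_eq_nil_of_le hlen]
    simp
  | succ m ih =>
    intro k hk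
    set s := PySem.List.sorted arr (fun y => y) false with hs
    have hklen : k < s.length := by omega
    rw [prefixBelowGo]
    have hget : PySem.List.pyGetD s (k : Int) 0 = s[k] := by
      rw [PySem.List.pyGetD_natCast]
      exact List.getD_eq_getElem s 0 hklen
    have hdrop : s.drop k = s[k] :: s.drop (k + 1) := List.drop_eq_getElem_cons hklen
    by_cases hx : s[k] < x
    · rw [dif_pos ⟨by omega, by rw [hget]; exact hx⟩]
      have h2 := ih (k + 1) (by omega)
      rw [show ((k : Int) + 1) = ((k + 1 : Nat) : Int) by omega, h2]
      rw [hdrop, List.countP_cons]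
      simp [hx]
      omega
    · rw [dif_neg (by rw [hget]; omega)]
      -- every element from position k on is ≥ s[k] ≥ x: the remaining count is 0
      have hzero : (s.drop k).countP (fun a => decide (a < x)) = 0 := by
        rw [List.countP_eq_zero]
        intro a ha
        simp only [decide_eq_true_eq, not_lt]
        obtain ⟨j, hj, hja⟩ := List.getElem_of_mem ha
        have hkj : k + j < s.length := by
          simp only [List.length_drop] at hj; omega
        have hle : s[k]'hklen ≤ (s[k + j]'hkj) :=
          PySem.List.sorted_id_getElem_mono arr (Nat.le_add_right k j) hkj
        rw [← hja, List.getElem_drop]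
        omega
      rw [hzero]; simp

-- counting below v+1 = counting below v plus the copies of v, on any Int list
theorem countP_lt_succ (l : List Int) (v : Int) :
    l.countP (fun a => decide (a < v + 1))
      = l.countP (fun a => decide (a < v)) + l.count v := by
  induction l with
  | nil => simp
  | cons a t ih =>
    rw [List.countP_cons, List.countP_cons, List.count_cons, ih]
    by_cases h1 : a < v
    · simp [h1, show a < v + 1 by omega, show ¬ a = v by omega]
      omega
    · by_cases h2 : a = v
      · subst h2; simp; omega
      · simp [h1, h2, show ¬ a < v + 1 by omega]

-- the while loop from 0 on the sorted list counts the elements of arr below x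
theorem prefixBelow_counts (arr : List Int) (x : Int) :
    prefixBelow (PySem.List.sorted arr (fun y => y) false) x
      = (arr.countP (fun a => decide (a < x)) : Int) := by
  unfold prefixBelow
  have h := prefixBelowGo_sorted arr x
    ((PySem.List.sorted arr (fun y => y) false).length - 0) 0 rfl
  simp only [Nat.cast_zero, List.drop_zero, zero_add] at h
  rw [h, (PySem.List.sorted_perm arr (fun y => y) false).countP_eq]

-- ===== VERDICT (by name: the statement is the Claim_ definition above) =====
theorem solution_spec : Claim_equal_solution := by
  intro arr _
  show solution arr = solution_alt arr
  have e1 : prefixBelow (PySem.List.sorted arr (fun y => y) false) 2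
      - prefixBelow (PySem.List.sorted arr (fun y => y) false) 1 = (arr.count 1 : Int) := by
    rw [prefixBelow_counts, prefixBelow_counts]
    have h := countP_lt_succ arr 1
    simp only [show (1:Int) + 1 = 2 from rfl] at h
    omega
  have e2 : prefixBelow (PySem.List.sorted arr (fun y => y) false) 3
      - prefixBelow (PySem.List.sorted arr (fun y => y) false) 2 = (arr.count 2 : Int) := by
    rw [prefixBelow_counts, prefixBelow_counts]
    have h := countP_lt_succ arr 2
    simp only [show (2:Int) + 1 = 3 from rfl] at h
    omega
  have hlen : ((PySem.List.sorted arr (fun y => y) false).length : Int) = (arr.length : Int) := by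
    rw [(PySem.List.sorted_perm arr (fun y => y) false).length_eq]
  unfold solution solution_alt
  rw [tally_fold]
  norm_num [PySem.List.pyRange, PySem.List.pyGetD, PySem.List.pyGet?, PySem.List.pyIdx?,
    List.range_succ, hlen, show (3:Int).toNat = 3 from rfl, show (2:Int).toNat = 2 from rfl,
    show (1:Int).toNat = 1 from rfl, show (0:Int).toNat = 0 from rfl,
    List.map_append, List.flatten, List.cons.injEq]
  refine ⟨?_, ?_, ?_⟩ <;> omega
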